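-- pv_equiv track=rewrite | github.com/thekoushikdurgas/Deloitte- | convert.py | _find_nested_block_end
-- ===== SOURCE A (Python) =====
-- from typing import Dict, List, Tuple
--
-- def _find_nested_block_end(lines: List[str], start_idx: int) -> int:
--     """Find the end of a nested IF block within shared content"""
--     nesting_level = 1
--     i = start_idx + 1
--
--     while i < len(lines) and nesting_level > 0:
--         line = lines[i].strip().upper()
--
--         if line.startswith('IF '):
--             nesting_level += 1
--         elif line.startswith('END IF'):
--             nesting_level -= 1
--
--         i += 1
--
--     return i - 1
-- ===== SOURCE B (Python) =====
-- from typing import List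
--
-- def _find_nested_block_end(lines: List[str], start_idx: int) -> int:
--     """Find the end of a nested IF block within shared content.
--
--     Recursive decomposition: _scan(i) returns the index of the END IF line
--     closing the block whose body starts at line i; nesting is handled by the
--     call stack (an inner IF is consumed by a recursive call) instead of a
--     depth counter.  If the block is never terminated, the index of the last
--     scanned line (i - 1 at the point we ran out) is returned.
--     """
--     def _scan(i: int) -> int:
--         while True:
--             if i >= len(lines):
--                 return i - 1
--             line = lines[i].strip().upper()
--             if line.startswith('IF '):
--                 i = _scan(i + 1) + 1
--             elif line.startswith('END IF'):
--                 return i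
--             else:
--                 i += 1
--
--     return _scan(start_idx + 1)
-- ===== Notes on version B (the rewrite author's own statement) =====
-- stated objective: alternative
-- what changed: Replaces A's explicit nesting_level depth counter with a recursive scanner whose call stack mirrors the nesting: on an inner IF it recursively consumes that block and resumes just past its END IF.
import Mathlib
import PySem

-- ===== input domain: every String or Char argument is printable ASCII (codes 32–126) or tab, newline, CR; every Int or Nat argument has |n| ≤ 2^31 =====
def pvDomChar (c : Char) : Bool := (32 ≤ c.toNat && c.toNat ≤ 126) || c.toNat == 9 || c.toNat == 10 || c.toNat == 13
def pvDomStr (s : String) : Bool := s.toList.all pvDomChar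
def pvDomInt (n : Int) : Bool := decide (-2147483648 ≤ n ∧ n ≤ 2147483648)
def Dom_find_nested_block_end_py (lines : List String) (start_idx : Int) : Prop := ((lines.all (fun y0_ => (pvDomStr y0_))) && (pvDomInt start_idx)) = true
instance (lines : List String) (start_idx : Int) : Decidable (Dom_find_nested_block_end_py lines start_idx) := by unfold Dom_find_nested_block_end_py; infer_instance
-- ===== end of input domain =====

-- B replaces A's nesting_level depth counter by a recursive scanner whose call stack mirrors
-- the nesting (objective: alternative, same cost). Return-value equivalence; neither mutates.

-- shared accessor: lines[i].strip().upper() — Pre_ guarantees pyGet? is some wherever it is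
-- read, so the getD "" default is never used on admitted inputs (Python raises IndexError there)
def pvLineAt (lines : List String) (i : Int) : String :=
  PySem.Str.upper (PySem.Str.strip ((PySem.List.pyGet? lines i).getD ""))

-- ===== PORT A =====
-- the while loop over state (i, nesting_level)
def pvLoopA (lines : List String) (i nesting_level : Int) : Int :=
  if h : i < (lines.length : Int) ∧ 0 < nesting_level then
    let line := pvLineAt lines i
    let nesting_level' :=
      if PySem.Str.startswith line "IF " then nesting_level + 1
      else if PySem.Str.startswith line "END IF" then nesting_level - 1
      else nesting_level
    pvLoopA lines (i + 1) nesting_level'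
  else
    i - 1
termination_by ((lines.length : Int) - i).toNat
decreasing_by omega

def find_nested_block_end_py (lines : List String) (start_idx : Int) : Int :=
  pvLoopA lines (start_idx + 1) 1

-- ===== PORT B =====
-- _scan; fuel is only a totality guard: on admitted inputs the scanned index grows by at
-- least 1 per step, so 2*len(lines)+1 steps always suffice (pvScanB_fuel below), and the
-- fuel-exhausted value i - 1 coincides with the past-the-end value, so it is never ad hoc.
def pvScanB (lines : List String) : Nat → Int → Int
  | 0, i => i - 1
  | fuel + 1, i =>
    if i < (lines.length : Int) then
      let line := pvLineAt lines i
      if PySem.Str.startswith line "IF " then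
        pvScanB lines fuel (pvScanB lines fuel (i + 1) + 1)
      else if PySem.Str.startswith line "END IF" then i
      else pvScanB lines fuel (i + 1)
    else i - 1

def find_nested_block_end_py_alt (lines : List String) (start_idx : Int) : Int :=
  pvScanB lines (2 * lines.length + 1) (start_idx + 1)

-- ===== PRECONDITION & SPEC =====
-- Pre_ excludes exactly the inputs where Python A raises IndexError: when start_idx + 1 is
-- below -len(lines), the first access lines[i] is out of range even after Python's
-- negative-index wraparound (Python B raises there too).
def Pre_find_nested_block_end_py (lines : List String) (start_idx : Int) : Prop :=
  -(lines.length : Int) ≤ start_idx + 1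
instance (lines : List String) (start_idx : Int) : Decidable (Pre_find_nested_block_end_py lines start_idx) := by unfold Pre_find_nested_block_end_py; infer_instance

def pvWitness_find_nested_block_end_py : List String × Int := (["IF A", "if b", "End If", "END IF", "x"], 0)

def Spec_find_nested_block_end_py (lines : List String) (start_idx : Int) (out : Int) : Prop := out = find_nested_block_end_py_alt lines start_idx
instance (lines : List String) (start_idx : Int) (out : Int) : Decidable (Spec_find_nested_block_end_py lines start_idx out) := by unfold Spec_find_nested_block_end_py; infer_instance

-- ===== CLAIM (what is proved, stated in full; the proofs are below) =====
def Claim_equal_find_nested_block_end_py : Prop := ∀ (lines : List String) (start_idx : Int), Dom_find_nested_block_end_py lines start_idx → Pre_find_nested_block_end_py lines start_idx → Spec_find_nested_block_end_py lines start_idx (find_nested_block_end_py lines start_idx)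

-- ===== LEMMAS AND PROOFS =====

theorem pvLoopA_stop (lines : List String) (i d : Int)
    (h : ¬ (i < (lines.length : Int) ∧ 0 < d)) : pvLoopA lines i d = i - 1 := by
  rw [pvLoopA, dif_neg h]

theorem pvLoopA_step (lines : List String) (i d : Int)
    (h : i < (lines.length : Int) ∧ 0 < d) :
    pvLoopA lines i d = pvLoopA lines (i + 1)
      (if PySem.Str.startswith (pvLineAt lines i) "IF " then d + 1
       else if PySem.Str.startswith (pvLineAt lines i) "END IF" then d - 1
       else d) := by
  rw [pvLoopA, dif_pos h]

-- the scanner never returns below i - 1 (whatever the fuel)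
theorem pvScanB_ge (lines : List String) :
    ∀ (fuel : Nat) (i : Int), i - 1 ≤ pvScanB lines fuel i := by
  intro fuel
  induction fuel with
  | zero => intro i; rw [pvScanB]
  | succ fuel ih =>
    intro i
    rw [pvScanB]
    by_cases hi : i < (lines.length : Int)
    · rw [if_pos hi]
      by_cases hIF : PySem.Str.startswith (pvLineAt lines i) "IF " = true
      · rw [if_pos hIF]
        have h1 := ih (i + 1)
        have h2 := ih (pvScanB lines fuel (i + 1) + 1)
        omega
      · rw [if_neg hIF]
        by_cases hEND : PySem.Str.startswith (pvLineAt lines i) "END IF" = true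
        · rw [if_pos hEND]
          omega
        · rw [if_neg hEND]
          have h1 := ih (i + 1)
          omega
    · rw [if_neg hi]

-- the result does not depend on the fuel once the fuel covers the remaining lines
theorem pvScanB_fuel (lines : List String) :
    ∀ (f g : Nat) (i : Int), ((lines.length : Int) - i).toNat ≤ f →
      ((lines.length : Int) - i).toNat ≤ g →
      pvScanB lines f i = pvScanB lines g i := by
  intro f
  induction f with
  | zero =>
    intro g i hf hg
    have hi : ¬ i < (lines.length : Int) := by omega
    cases g with
    | zero => rfl
    | succ g => rw [pvScanB, pvScanB, if_neg hi]
  | succ f ih =>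
    intro g i hf hg
    by_cases hi : i < (lines.length : Int)
    · cases g with
      | zero => omega
      | succ g =>
        rw [pvScanB, pvScanB, if_pos hi, if_pos hi]
        by_cases hIF : PySem.Str.startswith (pvLineAt lines i) "IF " = true
        · rw [if_pos hIF, if_pos hIF]
          have he : pvScanB lines f (i + 1) = pvScanB lines g (i + 1) :=
            ih g (i + 1) (by omega) (by omega)
          rw [← he]
          have hge := pvScanB_ge lines f (i + 1)
          exact ih g (pvScanB lines f (i + 1) + 1) (by omega) (by omega)
        · rw [if_neg hIF, if_neg hIF]
          by_cases hEND : PySem.Str.startswith (pvLineAt lines i) "END IF" = true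
          · rw [if_pos hEND, if_pos hEND]
          · rw [if_neg hEND, if_neg hEND]
            exact ih g (i + 1) (by omega) (by omega)
    · cases g with
      | zero => rw [pvScanB, pvScanB, if_neg hi]
      | succ g => rw [pvScanB, pvScanB, if_neg hi, if_neg hi]

-- Core invariant: A's loop at depth d from index i scans exactly one block (B's _scan),
-- then continues at depth d - 1 just past it.
theorem pvLoop_eq_scan (lines : List String) :
    ∀ (m : Nat) (i d : Int), ((lines.length : Int) - i).toNat ≤ m → 1 ≤ d →
      pvLoopA lines i d =
        (if d = 1 then pvScanB lines m i
         else pvLoopA lines (pvScanB lines m i + 1) (d - 1)) := by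
  intro m
  induction m with
  | zero =>
    intro i d hm hd
    have hni : ¬ i < (lines.length : Int) := by omega
    rw [pvLoopA_stop lines i d (by omega), pvScanB]
    by_cases h1 : d = 1
    · rw [if_pos h1]
    · rw [if_neg h1, pvLoopA_stop lines (i - 1 + 1) (d - 1) (by omega)]
      omega
  | succ m ih =>
    intro i d hm hd
    by_cases hi : i < (lines.length : Int)
    · rw [pvLoopA_step lines i d ⟨hi, by omega⟩, pvScanB, if_pos hi]
      by_cases hIF : PySem.Str.startswith (pvLineAt lines i) "IF " = true
      · rw [if_pos hIF, if_pos hIF]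
        -- A: depth d + 1 from i + 1;  B: scan the inner block, then continue past it
        have h1 : pvLoopA lines (i + 1) (d + 1) =
            pvLoopA lines (pvScanB lines m (i + 1) + 1) d := by
          have h2 := ih (i + 1) (d + 1) (by omega) (by omega)
          rw [h2, if_neg (by omega : ¬ d + 1 = 1), (by omega : d + 1 - 1 = d)]
        rw [h1]
        have he := pvScanB_ge lines m (i + 1)
        exact ih (pvScanB lines m (i + 1) + 1) d (by omega) hd
      · rw [if_neg hIF, if_neg hIF]
        by_cases hEND : PySem.Str.startswith (pvLineAt lines i) "END IF" = true
        · rw [if_pos hEND, if_pos hEND]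
          by_cases h1 : d = 1
          · subst h1
            rw [if_pos rfl, pvLoopA_stop lines (i + 1) (1 - 1) (by omega)]
            omega
          · rw [if_neg h1]
        · rw [if_neg hEND, if_neg hEND]
          exact ih (i + 1) d (by omega) hd
    · rw [pvLoopA_stop lines i d (by omega), pvScanB, if_neg hi]
      by_cases h1 : d = 1
      · rw [if_pos h1]
      · rw [if_neg h1, pvLoopA_stop lines (i - 1 + 1) (d - 1) (by omega)]
        omega

-- ===== VERDICT (by name: the statement is the Claim_ definition above) =====
theorem find_nested_block_end_py_spec : Claim_equal_find_nested_block_end_py := by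
  intro lines start_idx _ hpre
  unfold Spec_find_nested_block_end_py find_nested_block_end_py find_nested_block_end_py_alt
  have hkey := pvLoop_eq_scan lines ((lines.length : Int) - (start_idx + 1)).toNat
      (start_idx + 1) 1 (le_refl _) (le_refl _)
  rw [if_pos rfl] at hkey
  rw [hkey]
  exact pvScanB_fuel lines _ _ (start_idx + 1) (le_refl _)
    (by unfold Pre_find_nested_block_end_py at hpre; omega)
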